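-- pv_equiv track=rewrite | github.com/Sachin-02/YouTube-to-Spotify-Convertor | thing.py | filter_titles
-- ===== SOURCE A (Python) =====
-- def filter_titles(song_list):
--     split_chars = ["(", "|", "[", "."]
--     for char in split_chars:
--         i = 0
--         for song in song_list:
--             song_list[i] = song.split(char)[0]
--             i = i + 1
--     replace_words = [
--         "Lyrics",
--         "lyrics",
--         "LYRICS",
--         "Lyric",
--         "lyric",
--         "LYRIC",
--         "VIDEO",
--         "video",
--         "Video",
--         "ft",
--         "feat",
--     ]
--     for word in replace_words:
--         i = 0
--         for song in song_list:
--             song_list[i] = song.replace(word, "")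
--             i = i + 1
--     return song_list
-- ===== SOURCE B (Python) =====
-- def filter_titles(song_list):
--     replace_words = [
--         "Lyrics", "lyrics", "LYRICS", "Lyric", "lyric", "LYRIC",
--         "VIDEO", "video", "Video", "ft", "feat",
--     ]
--     for i, song in enumerate(song_list):
--         # truncate with ONE character scan that stops at the first split char
--         kept = []
--         for ch in song:
--             if ch in "(|[.":
--                 break
--             kept.append(ch)
--         song = "".join(kept)
--         # delete each word by split+join instead of str.replace
--         for word in replace_words:
--             song = "".join(song.split(word))
--         song_list[i] = song
--     return song_list
-- ===== Notes on version B (the rewrite author's own statement) =====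
-- stated objective: alternative
-- what changed: B makes a single in-place pass over the list: each title is truncated by one character scan that breaks at the first of the four split characters (instead of A's four whole-list split('c')[0] passes), and each word is deleted via ''.join(song.split(word)) instead of str.replace, so A's 15 list-rewriting passes become one pass with a different per-title mechanism.
import Mathlib
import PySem

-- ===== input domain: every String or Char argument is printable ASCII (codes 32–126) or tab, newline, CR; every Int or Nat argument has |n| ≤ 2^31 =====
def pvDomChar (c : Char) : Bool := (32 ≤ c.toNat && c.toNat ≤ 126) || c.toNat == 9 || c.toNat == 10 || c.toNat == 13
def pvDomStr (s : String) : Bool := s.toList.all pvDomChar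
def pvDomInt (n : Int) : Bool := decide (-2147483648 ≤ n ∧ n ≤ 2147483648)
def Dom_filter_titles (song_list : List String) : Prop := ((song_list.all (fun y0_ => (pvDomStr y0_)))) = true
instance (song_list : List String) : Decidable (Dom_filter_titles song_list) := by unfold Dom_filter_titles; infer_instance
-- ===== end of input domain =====

-- B cleans each title in one pass: a single character scan (stopping at the first split
-- character) replaces A's four whole-list split('c')[0] passes, and ''.join(split(word))
-- replaces str.replace; objective: alternative decomposition, return value proved equal
-- (both Pythons mutate song_list in place identically).

-- ===== PORT A =====
-- A: for each split char a full pass rewriting every cell with song.split(char)[0]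
-- (split result is always nonempty, so [0] is its head; headD "" is exact here),
-- then for each replace word another full pass with song.replace(word, "").
def pvSplitChars : List String := ["(", "|", "[", "."]

def pvReplaceWords : List String :=
  ["Lyrics", "lyrics", "LYRICS", "Lyric", "lyric", "LYRIC",
   "VIDEO", "video", "Video", "ft", "feat"]

def filter_titles (song_list : List String) : List String :=
  let l1 := pvSplitChars.foldl
    (fun l c => l.map (fun song => (((PySem.Str.split? song c).getD [])).headD "")) song_list
  pvReplaceWords.foldl
    (fun l w => l.map (fun song => PySem.Str.replace song w "")) l1

-- ===== PORT B =====
-- B: the char loop with break — keep characters until one of "(|[." is seen.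
def pvCut (song : String) : String :=
  String.ofList (song.toList.takeWhile (fun ch => !("(|[.".toList.contains ch)))

-- B: then each word is deleted by "".join(song.split(word)).
def pvClean (song : String) : String :=
  pvReplaceWords.foldl
    (fun s w => PySem.Str.join "" ((PySem.Str.split? s w).getD [])) (pvCut song)

def filter_titles_alt (song_list : List String) : List String :=
  song_list.map pvClean

-- ===== PRECONDITION & SPEC =====
def Spec_filter_titles (song_list : List String) (out : List String) : Prop := out = filter_titles_alt song_list
instance (song_list : List String) (out : List String) : Decidable (Spec_filter_titles song_list out) := by unfold Spec_filter_titles; infer_instance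

-- ===== CLAIM (what is proved, stated in full; the proofs are below) =====
def Claim_equal_filter_titles : Prop := ∀ (song_list : List String), Dom_filter_titles song_list → Spec_filter_titles song_list (filter_titles song_list)

-- ===== LEMMAS AND PROOFS =====

-- Folding a per-element map over a list of operations = mapping the per-element fold.
theorem foldl_map_comm {α β : Type} (g : β → α → β) (as : List α) (l : List β) :
    as.foldl (fun l a => l.map (fun x => g x a)) l
      = l.map (fun x => as.foldl g x) := by
  induction as generalizing l with
  | nil => simp
  | cons a as ih =>
    rw [List.foldl_cons, ih, List.map_map]
    exact List.map_congr_left fun x _ => rfl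

-- join with the empty separator distributes over cons.
theorem join_nil_cons (x : List Char) (xs : List (List Char)) :
    PySem.Chars.join [] (x :: xs) = x ++ PySem.Chars.join [] xs := by
  cases xs with
  | nil => simp [PySem.Chars.join_singleton, PySem.Chars.join_nil]
  | cons y ys => simp [PySem.Chars.join_cons_cons]

theorem join_nil_append (xs ys : List (List Char)) :
    PySem.Chars.join [] (xs ++ ys)
      = PySem.Chars.join [] xs ++ PySem.Chars.join [] ys := by
  induction xs with
  | nil => simp [PySem.Chars.join_nil]
  | cons x xs ih => simp [join_nil_cons, ih]

-- The result of removing every occurrence of w from l, with explicit fuel (the go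
-- functions of both Chars.replace and Chars.splitOn consume fuel in lockstep with it).
def pvRemove (w : List Char) : Nat → List Char → List Char
  | 0, l => l
  | _ + 1, [] => []
  | f + 1, c :: t =>
    if w.isPrefixOf (c :: t) then pvRemove w f (List.drop w.length (c :: t))
    else c :: pvRemove w f t

theorem replace_go_eq_pvRemove (w : List Char) (fuel : Nat) (l acc : List Char) :
    PySem.Chars.replace.go w [] fuel l acc = acc.reverse ++ pvRemove w fuel l := by
  induction fuel generalizing l acc with
  | zero => simp [PySem.Chars.replace.go, pvRemove]
  | succ f ih =>
    cases l with
    | nil => simp [PySem.Chars.replace.go, pvRemove]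
    | cons c t =>
      simp only [PySem.Chars.replace.go, pvRemove]
      split
      · rw [ih]; simp
      · rw [ih]; simp

theorem join_splitOn_go_eq_pvRemove (w : List Char) (fuel : Nat)
    (l cur : List Char) (acc : List (List Char)) :
    PySem.Chars.join [] (PySem.Chars.splitOn.go w fuel l cur acc)
      = PySem.Chars.join [] acc.reverse ++ cur.reverse ++ pvRemove w fuel l := by
  induction fuel generalizing l cur acc with
  | zero =>
    simp [PySem.Chars.splitOn.go, pvRemove, join_nil_append]
  | succ f ih =>
    cases l with
    | nil =>
      simp [PySem.Chars.splitOn.go, pvRemove, join_nil_append]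
    | cons c t =>
      simp only [PySem.Chars.splitOn.go, pvRemove]
      split
      · rw [ih]; simp [join_nil_append]
      · rw [ih]; simp

-- With enough fuel, pvRemove does not depend on the fuel (w nonempty).
theorem pvRemove_fuel_invariant (w : List Char) (hw : w ≠ []) :
    ∀ (f1 : Nat) (l : List Char) (f2 : Nat), l.length ≤ f1 → l.length ≤ f2 →
      pvRemove w f1 l = pvRemove w f2 l := by
  intro f1
  induction f1 with
  | zero =>
    intro l f2 h1 _
    have : l = [] := List.eq_nil_of_length_eq_zero (Nat.le_zero.mp h1)
    subst this
    cases f2 <;> simp [pvRemove]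
  | succ f ih =>
    intro l f2 h1 h2
    cases l with
    | nil => cases f2 <;> simp [pvRemove]
    | cons c t =>
      cases f2 with
      | zero => exact absurd h2 (by simp)
      | succ f2' =>
        simp only [pvRemove]
        split
        · rename_i hpre
          have hlen : 1 ≤ w.length := by
            cases w with
            | nil => exact absurd rfl hw
            | cons _ _ => simp
          have hdrop : (List.drop w.length (c :: t)).length ≤ f := by
            simp only [List.length_drop, List.length_cons]
            simp only [List.length_cons] at h1
            omega
          have hdrop2 : (List.drop w.length (c :: t)).length ≤ f2' := by
            simp only [List.length_drop, List.length_cons]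
            simp only [List.length_cons] at h2
            omega
          exact ih _ _ hdrop hdrop2
        · rename_i hpre
          have ht : t.length ≤ f := by simp at h1; omega
          have ht2 : t.length ≤ f2' := by simp at h2; omega
          rw [ih t f2' ht ht2]

-- splitOn.go is its acc-free run prefixed by acc.reverse.
theorem splitOn_go_acc (sep : List Char) (fuel : Nat) :
    ∀ (l cur : List Char) (acc : List (List Char)),
      PySem.Chars.splitOn.go sep fuel l cur acc
        = acc.reverse ++ PySem.Chars.splitOn.go sep fuel l cur [] := by
  induction fuel with
  | zero => intro l cur acc; simp [PySem.Chars.splitOn.go]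
  | succ f ih =>
    intro l cur acc
    cases l with
    | nil => simp [PySem.Chars.splitOn.go]
    | cons c t =>
      simp only [PySem.Chars.splitOn.go]
      split
      · rw [ih _ _ (cur.reverse :: acc), ih _ _ [cur.reverse]]; simp
      · rw [ih t (c :: cur) acc]

-- The first piece of a single-character split is the takeWhile prefix.
theorem splitOn_go_head (ch : Char) (fuel : Nat) :
    ∀ (l cur : List Char), l.length ≤ fuel →
      (PySem.Chars.splitOn.go [ch] fuel l cur []).head?
        = some (cur.reverse ++ l.takeWhile (fun a => a != ch)) := by
  induction fuel with
  | zero =>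
    intro l cur h
    have : l = [] := List.eq_nil_of_length_eq_zero (Nat.le_zero.mp h)
    subst this
    simp [PySem.Chars.splitOn.go]
  | succ f ih =>
    intro l cur h
    cases l with
    | nil => simp [PySem.Chars.splitOn.go]
    | cons c t =>
      simp only [PySem.Chars.splitOn.go]
      split
      · rename_i hpre
        have hc : ch = c := by simpa [List.isPrefixOf] using hpre
        subst hc
        rw [splitOn_go_acc]
        simp
      · rename_i hpre
        have hc : ¬ c = ch := fun hcc => hpre (by simp [List.isPrefixOf, hcc])
        have ht : t.length ≤ f := by simp at h; omega
        rw [ih t (c :: cur) ht]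
        simp [hc]

-- A's split step on one string, as a character scan.
theorem stepSplit_eq (s sep : String) (c : Char) (h : sep.toList = [c]) :
    ((PySem.Str.split? s sep).getD []).headD ""
      = String.ofList (s.toList.takeWhile (fun a => a != c)) := by
  simp only [PySem.Str.split?, h, PySem.Chars.split?, List.isEmpty_cons, Bool.false_eq_true,
    if_false, Option.map_some, Option.getD_some, PySem.Chars.splitOn,
    List.headD_eq_head?_getD, List.head?_map]
  rw [splitOn_go_head c (s.toList.length + 1) s.toList [] (by omega)]
  simp

-- A's replace step on one string equals B's join-of-split step (word nonempty).
theorem stepReplace_eq (s w : String) (hw : w.toList ≠ []) :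
    PySem.Str.replace s w "" = PySem.Str.join "" ((PySem.Str.split? s w).getD []) := by
  have hne : w.toList.isEmpty = false := by
    cases hlist : w.toList with
    | nil => exact absurd hlist hw
    | cons _ _ => rfl
  simp only [PySem.Str.replace, PySem.Str.join, PySem.Str.split?, PySem.Chars.split?, hne,
    Bool.false_eq_true, if_false, Option.map_some, Option.getD_some, List.map_map]
  have hmap : (List.map (String.toList ∘ String.ofList)
      (PySem.Chars.splitOn s.toList w.toList))
      = PySem.Chars.splitOn s.toList w.toList := by
    simp only [Function.comp_def, String.toList_ofList]
    exact List.map_id _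
  rw [hmap]
  congr 1
  rw [show ("" : String).toList = [] from rfl]
  simp only [PySem.Chars.replace, hne, Bool.false_eq_true, if_false]
  rw [replace_go_eq_pvRemove, PySem.Chars.splitOn, join_splitOn_go_eq_pvRemove]
  simp only [List.reverse_nil, PySem.Chars.join_nil, List.nil_append]
  exact pvRemove_fuel_invariant w.toList hw _ _ _ (le_refl _) (Nat.le_succ _)

-- Per-title: A's four split passes then eleven replace passes = B's pvClean.
theorem clean_eq (s : String) :
    pvReplaceWords.foldl (fun s w => PySem.Str.replace s w "")
      (pvSplitChars.foldl
        (fun s c => ((PySem.Str.split? s c).getD []).headD "") s) = pvClean s := by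
  have hsplit : pvSplitChars.foldl
      (fun s c => ((PySem.Str.split? s c).getD []).headD "") s = pvCut s := by
    simp only [pvSplitChars, List.foldl_cons, List.foldl_nil]
    rw [stepSplit_eq _ "(" '(' rfl, stepSplit_eq _ "|" '|' rfl,
        stepSplit_eq _ "[" '[' rfl, stepSplit_eq _ "." '.' rfl]
    simp only [String.toList_ofList, List.takeWhile_takeWhile]
    unfold pvCut
    congr 2
    funext a
    by_cases h1 : a = '(' <;> by_cases h2 : a = '|' <;> by_cases h3 : a = '[' <;>
      by_cases h4 : a = '.' <;> simp [h1, h2, h3, h4]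
  rw [hsplit]
  unfold pvClean
  refine PySem.List.foldl_congr_mem _ _ _ _ ?_
  intro acc w hwmem
  apply stepReplace_eq
  simp only [pvReplaceWords, List.mem_cons, List.not_mem_nil, or_false] at hwmem
  rcases hwmem with rfl | rfl | rfl | rfl | rfl | rfl | rfl | rfl | rfl | rfl | rfl <;> decide

-- ===== VERDICT (by name: the statement is the Claim_ definition above) =====
theorem filter_titles_spec : Claim_equal_filter_titles := by
  intro song_list _
  unfold Spec_filter_titles filter_titles filter_titles_alt
  rw [foldl_map_comm, foldl_map_comm, List.map_map]
  simp only [Function.comp_def]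
  apply List.map_congr_left
  intro s _
  exact clean_eq s
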